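-- pv_equiv track=rewrite | github.com/VladOgai/csmipt | 2nd semester/3rd week/p1.py | build_2_tree
-- ===== SOURCE A (Python) =====
-- def transpose(arr):
--     transarr = [[arr[j][i] for j in range(len(arr))] for i in range(len(arr[0]))]
--     return transarr
--
-- def build_2_tree(mat: list[list[int]], n: int):
--     tree = mat.copy()
--     tree2 = [[[mat[j][i]] for i in range(len(mat[0]))] for j in range(len(mat))]
--     for i in range(n):
--         tree[i] = trah_tibidoh_so_strokoy(tree[i])
--         tree2[i] = trtr(tree2[i])
--     tree = transpose(tree)
--     tree2 = transpose(tree2)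
--     for j in range(len(tree)):
--         tree[j] = trah_tibidoh_so_strokoy(tree[j])
--         tree2[j] = trtr(tree2[j])
--     tree = transpose(tree)
--     tree2 = transpose(tree2)
--     return tree, tree2
--
-- def trtr(arr):
--     if len(arr) == 1:
--         return arr
--     plusarr = []
--     if len(arr) % 2 == 0:
--         for i in range(0, len(arr), 2):
--             plusarr.append([*arr[i], *arr[i + 1]])
--     else:
--         plusarr.append(arr[0])
--         for i in range(1, len(arr), 2):
--             plusarr.append([*arr[i], *arr[i + 1]])
--     return arr + trtr(plusarr)
--
-- def trah_tibidoh_so_strokoy(arr: list[int]):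
--     if len(arr) == 1:
--         return arr
--     plusarr = []
--     if len(arr) % 2 == 0:
--         for i in range(0, len(arr), 2):
--             plusarr.append(arr[i] + arr[i + 1])
--     else:
--         plusarr.append(arr[0])
--         for i in range(1, len(arr), 2):
--             plusarr.append(arr[i] + arr[i + 1])
--     return arr + trah_tibidoh_so_strokoy(plusarr)
-- ===== SOURCE B (Python) =====
-- def transpose(arr):
--     transarr = [[arr[j][i] for j in range(len(arr))] for i in range(len(arr[0]))]
--     return transarr
--
-- def _add(x, y):
--     return x + y
--
-- def _cat(x, y):
--     return [*x, *y]
--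
-- def _next_level(cur, comb):
--     if len(cur) % 2 == 0:
--         return [comb(cur[i], cur[i + 1]) for i in range(0, len(cur), 2)]
--     return [cur[0]] + [comb(cur[i], cur[i + 1]) for i in range(1, len(cur), 2)]
--
-- def _levels(arr, comb):
--     res = []
--     cur = arr
--     while len(cur) != 1:
--         res += cur
--         cur = _next_level(cur, comb)
--     return res + cur
--
-- def build_2_tree(mat: list[list[int]], n: int):
--     tree = [_levels(row, _add) if i < n else list(row) for i, row in enumerate(mat)]
--     tree2 = [_levels([[x] for x in row], _cat) if i < n else [[x] for x in row]
--              for i, row in enumerate(mat)]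
--     tree = [_levels(col, _add) for col in transpose(tree)]
--     tree2 = [_levels(col, _cat) for col in transpose(tree2)]
--     return transpose(tree), transpose(tree2)
-- ===== Notes on version B (the rewrite author's own statement) =====
-- stated objective: simpler
-- what changed: The two near-identical linear-recursive pyramid builders (int sums and list concatenations) are replaced by one generic iterative routine: a single level-building while-loop parametrised by the combine operation, with the per-level pairing done by one shared _next_level helper; the row/column passes become comprehensions over enumerate/transpose instead of in-place index assignment loops.
import Mathlib
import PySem

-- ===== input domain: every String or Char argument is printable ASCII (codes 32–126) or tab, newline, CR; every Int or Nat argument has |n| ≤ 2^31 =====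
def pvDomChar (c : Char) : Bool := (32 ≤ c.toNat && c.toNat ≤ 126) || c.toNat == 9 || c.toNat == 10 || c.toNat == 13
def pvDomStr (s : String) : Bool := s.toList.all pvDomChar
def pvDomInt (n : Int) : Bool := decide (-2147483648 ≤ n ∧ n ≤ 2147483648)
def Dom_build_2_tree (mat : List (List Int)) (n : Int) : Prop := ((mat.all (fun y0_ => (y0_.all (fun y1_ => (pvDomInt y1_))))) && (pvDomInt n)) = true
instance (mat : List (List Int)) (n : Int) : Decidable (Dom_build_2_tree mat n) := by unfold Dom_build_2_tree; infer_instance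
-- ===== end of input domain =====

-- B replaces the two near-identical linear-recursive level builders (int sums / list concatenations)
-- by one generic iterative level loop parametrised by the combine operation; same return value on Pre_.

-- ===== PORT A =====
-- transpose(arr); Python raises IndexError on arr = [] (mat = [] is outside Pre_); shared verbatim by both Pythons
def transposeP {α : Type} (d : α) (arr : List (List α)) : List (List α) :=
  (PySem.List.pyRange 0 ((PySem.List.pyGetD arr 0 []).length : Int) 1).map (fun i =>
    (PySem.List.pyRange 0 (arr.length : Int) 1).map (fun j =>
      PySem.List.pyGetD (PySem.List.pyGetD arr j []) i d))

-- the plusarr-building loops of trah_tibidoh_so_strokoy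
def trahPlus (arr : List Int) : List Int :=
  if arr.length % 2 = 0 then
    (PySem.List.pyRange 0 (arr.length : Int) 2).foldl
      (fun p i => p ++ [PySem.List.pyGetD arr i 0 + PySem.List.pyGetD arr (i + 1) 0]) []
  else
    (PySem.List.pyRange 1 (arr.length : Int) 2).foldl
      (fun p i => p ++ [PySem.List.pyGetD arr i 0 + PySem.List.pyGetD arr (i + 1) 0])
      [PySem.List.pyGetD arr 0 0]

-- the plusarr-building loops of trtr
def trtrPlus (arr : List (List Int)) : List (List Int) :=
  if arr.length % 2 = 0 then
    (PySem.List.pyRange 0 (arr.length : Int) 2).foldl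
      (fun p i => p ++ [PySem.List.pyGetD arr i [] ++ PySem.List.pyGetD arr (i + 1) []]) []
  else
    (PySem.List.pyRange 1 (arr.length : Int) 2).foldl
      (fun p i => p ++ [PySem.List.pyGetD arr i [] ++ PySem.List.pyGetD arr (i + 1) []])
      [PySem.List.pyGetD arr 0 []]

lemma fold_append_len {α β : Type} (l : List α) (f : α → β) (init : List β) :
    (l.foldl (fun p i => p ++ [f i]) init).length = init.length + l.length := by
  rw [PySem.List.foldl_append_singleton_eq_map]; simp

lemma trahPlus_len_lt (arr : List Int) (h : 2 ≤ arr.length) :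
    (trahPlus arr).length < arr.length := by
  have hL : (0 : Int) < (arr.length : Int) := by exact_mod_cast Nat.lt_of_lt_of_le (by norm_num) h
  unfold trahPlus
  by_cases h2 : arr.length % 2 = 0
  · rw [if_pos h2,
      fold_append_len (f := fun i => PySem.List.pyGetD arr i 0 + PySem.List.pyGetD arr (i + 1) 0),
      PySem.List.pyRange_of_pos _ _ (by norm_num : (0:Int) < 2),
      if_pos (show (0:Int) < (arr.length : Int) by omega)]
    simp; omega
  · rw [if_neg h2,
      fold_append_len (f := fun i => PySem.List.pyGetD arr i 0 + PySem.List.pyGetD arr (i + 1) 0),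
      PySem.List.pyRange_of_pos _ _ (by norm_num : (0:Int) < 2),
      if_pos (show (1:Int) < (arr.length : Int) by omega)]
    simp; omega

lemma trtrPlus_len_lt (arr : List (List Int)) (h : 2 ≤ arr.length) :
    (trtrPlus arr).length < arr.length := by
  have hL : (0 : Int) < (arr.length : Int) := by exact_mod_cast Nat.lt_of_lt_of_le (by norm_num) h
  unfold trtrPlus
  by_cases h2 : arr.length % 2 = 0
  · rw [if_pos h2,
      fold_append_len (f := fun i => PySem.List.pyGetD arr i [] ++ PySem.List.pyGetD arr (i + 1) []),
      PySem.List.pyRange_of_pos _ _ (by norm_num : (0:Int) < 2),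
      if_pos (show (0:Int) < (arr.length : Int) by omega)]
    simp; omega
  · rw [if_neg h2,
      fold_append_len (f := fun i => PySem.List.pyGetD arr i [] ++ PySem.List.pyGetD arr (i + 1) []),
      PySem.List.pyRange_of_pos _ _ (by norm_num : (0:Int) < 2),
      if_pos (show (1:Int) < (arr.length : Int) by omega)]
    simp; omega

-- trah_tibidoh_so_strokoy; the length-1 stop is written `≤ 1` so the port is total
-- (Python diverges on a length-0 row, which is outside Pre_)
def trah (arr : List Int) : List Int :=
  if arr.length ≤ 1 then arr else arr ++ trah (trahPlus arr)
termination_by arr.length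
decreasing_by exact trahPlus_len_lt _ (by omega)

-- trtr; same remark on length 0
def trtr (arr : List (List Int)) : List (List Int) :=
  if arr.length ≤ 1 then arr else arr ++ trtr (trtrPlus arr)
termination_by arr.length
decreasing_by exact trtrPlus_len_lt _ (by omega)

def build_2_tree (mat : List (List Int)) (n : Int) : List (List Int) × List (List (List Int)) :=
  let tree := mat
  let tree2 := (PySem.List.pyRange 0 (mat.length : Int) 1).map (fun j =>
    (PySem.List.pyRange 0 ((PySem.List.pyGetD mat 0 []).length : Int) 1).map (fun i =>
      [PySem.List.pyGetD (PySem.List.pyGetD mat j []) i 0]))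
  let tree := (PySem.List.pyRange 0 n 1).foldl
    (fun t i => PySem.List.pySetD t i (trah (PySem.List.pyGetD t i []))) tree
  let tree2 := (PySem.List.pyRange 0 n 1).foldl
    (fun t i => PySem.List.pySetD t i (trtr (PySem.List.pyGetD t i []))) tree2
  let tree := transposeP 0 tree
  let tree2 := transposeP [] tree2
  let tree := (PySem.List.pyRange 0 (tree.length : Int) 1).foldl
    (fun t j => PySem.List.pySetD t j (trah (PySem.List.pyGetD t j []))) tree
  let tree2 := (PySem.List.pyRange 0 (tree2.length : Int) 1).foldl
    (fun t j => PySem.List.pySetD t j (trtr (PySem.List.pyGetD t j []))) tree2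
  (transposeP 0 tree, transposeP [] tree2)

-- ===== PORT B =====
-- _next_level(cur, comb)
def nextLevel {α : Type} (d : α) (comb : α → α → α) (cur : List α) : List α :=
  if cur.length % 2 = 0 then
    (PySem.List.pyRange 0 (cur.length : Int) 2).map
      (fun i => comb (PySem.List.pyGetD cur i d) (PySem.List.pyGetD cur (i + 1) d))
  else
    PySem.List.pyGetD cur 0 d ::
      (PySem.List.pyRange 1 (cur.length : Int) 2).map
        (fun i => comb (PySem.List.pyGetD cur i d) (PySem.List.pyGetD cur (i + 1) d))

lemma nextLevel_len_lt {α : Type} (d : α) (comb : α → α → α) (cur : List α)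
    (h : 2 ≤ cur.length) : (nextLevel d comb cur).length < cur.length := by
  have hL : (0 : Int) < (cur.length : Int) := by exact_mod_cast Nat.lt_of_lt_of_le (by norm_num) h
  unfold nextLevel
  by_cases h2 : cur.length % 2 = 0
  · rw [if_pos h2, PySem.List.pyRange_of_pos _ _ (by norm_num : (0:Int) < 2),
      if_pos (show (0:Int) < (cur.length : Int) by omega)]
    simp; omega
  · rw [if_neg h2, PySem.List.pyRange_of_pos _ _ (by norm_num : (0:Int) < 2),
      if_pos (show (1:Int) < (cur.length : Int) by omega)]
    simp; omega

-- the `while len(cur) != 1` loop of _levels; stop is `≤ 1` so the port is total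
-- (Python loops forever on an empty level, outside Pre_)
def levelsGo {α : Type} (d : α) (comb : α → α → α) (res cur : List α) : List α :=
  if cur.length ≤ 1 then res ++ cur
  else levelsGo d comb (res ++ cur) (nextLevel d comb cur)
termination_by cur.length
decreasing_by exact nextLevel_len_lt _ _ _ (by omega)

-- _levels(arr, comb)
def levels {α : Type} (d : α) (comb : α → α → α) (arr : List α) : List α :=
  levelsGo d comb [] arr

def build_2_tree_alt (mat : List (List Int)) (n : Int) : List (List Int) × List (List (List Int)) :=
  let tree := (PySem.List.enumerate mat 0).map
    (fun p => if p.1 < n then levels 0 (· + ·) p.2 else p.2)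
  let tree2 := (PySem.List.enumerate mat 0).map
    (fun p => if p.1 < n then levels [] (· ++ ·) (p.2.map (fun x => [x]))
              else p.2.map (fun x => [x]))
  let tree := (transposeP 0 tree).map (levels 0 (· + ·))
  let tree2 := (transposeP [] tree2).map (levels [] (· ++ ·))
  (transposeP 0 tree, transposeP [] tree2)

-- ===== PRECONDITION & SPEC =====
-- Pre_ excludes inputs where A raises (mat = [] or an empty first row: IndexError/RecursionError;
-- n > len(mat): IndexError; 0 < n < len(mat) with rows of length ≥ 2: IndexError in transpose) and,
-- beyond that, matrices that are both ragged AND row-processed (0 < n), where A's transpose first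
-- silently truncates every row to the first row's width — an accident of its implementation that no
-- caller of a matrix function would specify.
def Pre_build_2_tree (mat : List (List Int)) (n : Int) : Prop :=
  mat ≠ [] ∧ 0 < (mat.headD []).length ∧
    ((n ≤ 0 ∧ ∀ row ∈ mat, (mat.headD []).length ≤ row.length) ∨
      ((∀ row ∈ mat, row.length = (mat.headD []).length) ∧
        (n = mat.length ∨ ((mat.headD []).length = 1 ∧ n ≤ mat.length))))
instance (mat : List (List Int)) (n : Int) : Decidable (Pre_build_2_tree mat n) := by
  unfold Pre_build_2_tree; infer_instance

def pvWitness_build_2_tree : List (List Int) × Int := ([[1, 2], [3, 4]], 2)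

def Spec_build_2_tree (mat : List (List Int)) (n : Int) (out : List (List Int) × List (List (List Int))) : Prop := out = build_2_tree_alt mat n
instance (mat : List (List Int)) (n : Int) (out : List (List Int) × List (List (List Int))) : Decidable (Spec_build_2_tree mat n out) := by unfold Spec_build_2_tree; infer_instance

-- ===== CLAIM (what is proved, stated in full; the proofs are below) =====
def Claim_equal_build_2_tree : Prop := ∀ (mat : List (List Int)) (n : Int), Dom_build_2_tree mat n → Pre_build_2_tree mat n → Spec_build_2_tree mat n (build_2_tree mat n)

-- ===== LEMMAS AND PROOFS =====

lemma nextLevel_add (arr : List Int) : nextLevel 0 (· + ·) arr = trahPlus arr := by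
  unfold nextLevel trahPlus
  split <;> rw [PySem.List.foldl_append_singleton_eq_map] <;> simp

lemma nextLevel_cat (arr : List (List Int)) : nextLevel [] (· ++ ·) arr = trtrPlus arr := by
  unfold nextLevel trtrPlus
  split <;> rw [PySem.List.foldl_append_singleton_eq_map] <;> simp

lemma levelsGo_trah (cur res : List Int) : levelsGo 0 (· + ·) res cur = res ++ trah cur := by
  by_cases h : cur.length ≤ 1
  · rw [levelsGo, trah]; simp [h]
  · rw [levelsGo, trah]
    simp only [if_neg h]
    rw [levelsGo_trah (nextLevel 0 (· + ·) cur) (res ++ cur), nextLevel_add, List.append_assoc]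
termination_by cur.length
decreasing_by exact nextLevel_len_lt _ _ _ (by omega)

lemma levelsGo_trtr (cur res : List (List Int)) :
    levelsGo [] (· ++ ·) res cur = res ++ trtr cur := by
  by_cases h : cur.length ≤ 1
  · rw [levelsGo, trtr]; simp [h]
  · rw [levelsGo, trtr]
    simp only [if_neg h]
    rw [levelsGo_trtr (nextLevel [] (· ++ ·) cur) (res ++ cur), nextLevel_cat, List.append_assoc]
termination_by cur.length
decreasing_by exact nextLevel_len_lt _ _ _ (by omega)

lemma levels_add : levels 0 (· + ·) = trah := by
  funext arr; rw [levels, levelsGo_trah, List.nil_append]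

lemma levels_cat : levels [] (· ++ ·) = trtr := by
  funext arr; rw [levels, levelsGo_trtr, List.nil_append]

lemma enumerate_getElem? {α : Type} (xs : List α) (s : Int) (k : Nat) :
    (PySem.List.enumerate xs s)[k]? = xs[k]?.map (fun a => (s + k, a)) := by
  induction xs generalizing s k with
  | nil => simp [PySem.List.enumerate_nil]
  | cons x xs ih =>
    cases k with
    | zero => simp [PySem.List.enumerate_cons]
    | succ k => simp [PySem.List.enumerate_cons, ih, add_assoc]; ring_nf

lemma enumerate_map {α β : Type} (g : α → β) (xs : List α) (s : Int) :
    PySem.List.enumerate (xs.map g) s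
      = (PySem.List.enumerate xs s).map (fun p => (p.1, g p.2)) := by
  induction xs generalizing s with
  | nil => simp [PySem.List.enumerate_nil]
  | cons x xs ih => simp [PySem.List.enumerate_cons, ih]

lemma enumMap_id {α : Type} (f : α → α) (n : Int) (xs : List α) (s : Int) (h : n ≤ s) :
    (PySem.List.enumerate xs s).map (fun p => if p.1 < n then f p.2 else p.2) = xs := by
  induction xs generalizing s with
  | nil => simp [PySem.List.enumerate_nil]
  | cons x xs ih =>
    rw [PySem.List.enumerate_cons]
    simp only [List.map_cons]
    rw [if_neg (by omega), ih (s + 1) (by omega)]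

lemma enumMap_id' {α β : Type} (g : α → β) (f : β → β) (n : Int) (xs : List α) (s : Int)
    (h : n ≤ s) :
    (PySem.List.enumerate xs s).map (fun p => if p.1 < n then f (g p.2) else g p.2)
      = xs.map g := by
  induction xs generalizing s with
  | nil => simp [PySem.List.enumerate_nil]
  | cons x xs ih =>
    rw [PySem.List.enumerate_cons]
    simp only [List.map_cons]
    rw [if_neg (by omega), ih (s + 1) (by omega)]

lemma enumMap_all {α : Type} (f : α → α) (n : Int) (xs : List α) (s : Int)
    (h : s + xs.length ≤ n) :
    (PySem.List.enumerate xs s).map (fun p => if p.1 < n then f p.2 else p.2) = xs.map f := by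
  induction xs generalizing s with
  | nil => simp [PySem.List.enumerate_nil]
  | cons x xs ih =>
    rw [PySem.List.enumerate_cons]
    simp only [List.map_cons]
    rw [if_pos (by simp at h ⊢; omega), ih (s + 1) (by simp at h ⊢; omega)]

lemma foldSetNat {α : Type} (d : α) (f : α → α) (m : Nat) (xs : List α) :
    (PySem.List.pyRange 0 (m : Int) 1).foldl
        (fun t i => PySem.List.pySetD t i (f (PySem.List.pyGetD t i d))) xs
      = (PySem.List.enumerate xs 0).map (fun p => if p.1 < (m : Int) then f p.2 else p.2) := by
  induction m with
  | zero =>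
    rw [show ((0 : Nat) : Int) = 0 from rfl, PySem.List.pyRange_one_eq_nil le_rfl,
      List.foldl_nil, enumMap_id f 0 xs 0 le_rfl]
  | succ m ih =>
    rw [show ((m + 1 : Nat) : Int) = (m : Int) + 1 by push_cast; ring,
      PySem.List.pyRange_one_succ_right (by positivity), List.foldl_append, List.foldl_cons,
      List.foldl_nil, ih]
    simp only [PySem.List.pySetD_natCast, PySem.List.pyGetD_natCast]
    apply List.ext_getElem?
    intro k
    rw [List.getElem?_set]
    by_cases hk : k < xs.length
    · have hE : ∀ (j : Int), ((PySem.List.enumerate xs 0).map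
          (fun p => if p.1 < j then f p.2 else p.2))[k]?
            = xs[k]?.map (fun a => if (k : Int) < j then f a else a) := by
        intro j
        rw [List.getElem?_map, enumerate_getElem?]
        cases xs[k]? <;> simp
      by_cases hm : m = k
      · subst hm
        rw [if_pos rfl, if_pos (by simp [PySem.List.length_enumerate, hk]),
          List.getD_eq_getElem?_getD, hE, hE]
        rw [List.getElem?_eq_getElem hk]
        simp
      · rw [if_neg hm, hE, hE]
        cases xs[k]? with
        | none => rfl
        | some a =>
          simp only [Option.map_some, Option.some.injEq]
          by_cases hkm : (k : Int) < (m : Int)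
          · rw [if_pos hkm, if_pos (by omega)]
          · rw [if_neg hkm, if_neg (by omega)]
    · have hlen : ∀ (j : Int), ((PySem.List.enumerate xs 0).map
          (fun p => if p.1 < j then f p.2 else p.2)).length ≤ k := by
        intro j; simp [PySem.List.length_enumerate]; omega
      rw [List.getElem?_eq_none (hlen _), List.getElem?_eq_none (hlen _)]
      split <;> [skip; rfl]
      rw [if_neg (by simp [PySem.List.length_enumerate]; omega)]

lemma foldSet {α : Type} (d : α) (f : α → α) (n : Int) (xs : List α) :
    (PySem.List.pyRange 0 n 1).foldl
        (fun t i => PySem.List.pySetD t i (f (PySem.List.pyGetD t i d))) xs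
      = (PySem.List.enumerate xs 0).map (fun p => if p.1 < n then f p.2 else p.2) := by
  by_cases h : n ≤ 0
  · rw [PySem.List.pyRange_one_eq_nil h, List.foldl_nil, enumMap_id f n xs 0 h]
  · have : n = ((n.toNat : Nat) : Int) := by omega
    rw [this, foldSetNat]

lemma foldSet_all {α : Type} (d : α) (f : α → α) (xs : List α) :
    (PySem.List.pyRange 0 (xs.length : Int) 1).foldl
        (fun t i => PySem.List.pySetD t i (f (PySem.List.pyGetD t i d))) xs
      = xs.map f := by
  rw [foldSet, enumMap_all f _ xs 0 (by simp)]

lemma init2_eq (mat : List (List Int))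
    (hrect : ∀ row ∈ mat, row.length = (PySem.List.pyGetD mat 0 []).length) :
    (PySem.List.pyRange 0 (mat.length : Int) 1).map (fun j =>
        (PySem.List.pyRange 0 ((PySem.List.pyGetD mat 0 []).length : Int) 1).map (fun i =>
          [PySem.List.pyGetD (PySem.List.pyGetD mat j []) i 0]))
      = mat.map (fun row => row.map (fun x => [x])) := by
  apply List.ext_getElem?
  intro j
  by_cases hj : j < mat.length
  · rw [PySem.List.getElem?_map_pyRange_zero _ _ _ hj, List.getElem?_map,
      List.getElem?_eq_getElem hj]
    simp only [Option.map_some, Option.some.injEq]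
    have hrow : PySem.List.pyGetD mat (j : Int) [] = mat[j] := by
      rw [PySem.List.pyGetD_natCast, List.getD_eq_getElem?_getD, List.getElem?_eq_getElem hj]
      rfl
    rw [hrow, ← hrect mat[j] (List.getElem_mem hj),
      show (PySem.List.pyRange 0 (mat[j].length : Int) 1).map
          (fun i => [PySem.List.pyGetD mat[j] i 0])
        = ((PySem.List.pyRange 0 (mat[j].length : Int) 1).map
            (fun i => PySem.List.pyGetD mat[j] i 0)).map (fun x => [x]) by
        rw [List.map_map]; rfl,
      PySem.List.map_pyGetD_pyRange_zero']
  · rw [List.getElem?_eq_none (by simpa using hj),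
      List.getElem?_eq_none (by simp; omega)]

lemma transposeP_init2 (mat : List (List Int))
    (hge : ∀ row ∈ mat, (PySem.List.pyGetD mat 0 []).length ≤ row.length) :
    transposeP ([] : List Int)
        ((PySem.List.pyRange 0 (mat.length : Int) 1).map (fun j =>
          (PySem.List.pyRange 0 ((PySem.List.pyGetD mat 0 []).length : Int) 1).map (fun i =>
            [PySem.List.pyGetD (PySem.List.pyGetD mat j []) i 0])))
      = transposeP [] (mat.map (fun row => row.map (fun x => [x]))) := by
  cases mat with
  | nil =>
    rfl
  | cons r rs =>
    unfold transposeP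
    have hL : (PySem.List.pyGetD (r :: rs) 0 []).length = r.length := by
      rw [PySem.List.pyGetD_zero_cons]
    have h1 : PySem.List.pyGetD
        ((PySem.List.pyRange 0 (((r :: rs) : List (List Int)).length : Int) 1).map (fun j =>
          (PySem.List.pyRange 0 ((PySem.List.pyGetD (r :: rs) 0 []).length : Int) 1).map (fun i =>
            [PySem.List.pyGetD (PySem.List.pyGetD (r :: rs) j []) i 0]))) 0 []
        = (PySem.List.pyRange 0 ((PySem.List.pyGetD (r :: rs) 0 []).length : Int) 1).map (fun i =>
            [PySem.List.pyGetD (PySem.List.pyGetD (r :: rs) 0 []) i 0]) := by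
      rw [PySem.List.pyGetD_map_pyRange_of_nonneg _ _ _ _ le_rfl (by simp)]
    have h2 : PySem.List.pyGetD (((r :: rs) : List (List Int)).map
        (fun row => row.map (fun x => [x]))) 0 [] = r.map (fun x => [x]) := by
      rw [List.map_cons, PySem.List.pyGetD_zero_cons]
    rw [h1, h2]
    simp only [List.length_map, PySem.List.length_pyRange_one, Int.sub_zero, Int.toNat_natCast]
    rw [← hL]
    apply List.map_congr_left
    intro i hi
    obtain ⟨hi0, hiL⟩ := PySem.List.mem_pyRange_one.mp hi
    apply List.map_congr_left
    intro j hj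
    obtain ⟨hj0, hjn⟩ := PySem.List.mem_pyRange_one.mp hj
    have hrow : PySem.List.pyGetD (r :: rs) j [] = (r :: rs)[j.toNat]'(by omega) :=
      PySem.List.pyGetD_eq_getElem _ _ hj0 hjn
    have hmem : (r :: rs)[j.toNat]'(by omega) ∈ r :: rs := List.getElem_mem _
    have hlenrow : ((PySem.List.pyGetD (r :: rs) 0 []).length : Int)
        ≤ (((r :: rs)[j.toNat]'(by omega)).length : Int) := by exact_mod_cast hge _ hmem
    rw [PySem.List.pyGetD_map_pyRange_of_nonneg _ _ _ _ hj0 hjn,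
      PySem.List.pyGetD_map_pyRange_of_nonneg _ _ _ _ hi0 hiL, hrow,
      PySem.List.pyGetD_eq_getElem
        (List.map (fun row => List.map (fun x => [x]) row) (r :: rs)) [] hj0
        (by simpa using hjn),
      List.getElem_map,
      PySem.List.pyGetD_eq_getElem ((r :: rs)[j.toNat]'(by omega)) 0 hi0 (by omega),
      PySem.List.pyGetD_eq_getElem (List.map (fun x => [x]) ((r :: rs)[j.toNat]'(by omega))) []
        hi0 (by simp; omega),
      List.getElem_map]

theorem build_2_tree_eq_nle (mat : List (List Int)) (n : Int) (hn : n ≤ 0)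
    (hge : ∀ row ∈ mat, (PySem.List.pyGetD mat 0 []).length ≤ row.length) :
    build_2_tree mat n = build_2_tree_alt mat n := by
  unfold build_2_tree build_2_tree_alt
  simp only [foldSet_all]
  simp only [foldSet, levels_add, levels_cat]
  rw [enumMap_id _ n _ 0 hn, enumMap_id _ n _ 0 hn,
    enumMap_id' _ trtr n _ 0 hn, transposeP_init2 mat hge]

theorem build_2_tree_eq (mat : List (List Int)) (n : Int)
    (hrect : ∀ row ∈ mat, row.length = (PySem.List.pyGetD mat 0 []).length) :
    build_2_tree mat n = build_2_tree_alt mat n := by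
  unfold build_2_tree build_2_tree_alt
  simp only [foldSet_all]
  simp only [foldSet, init2_eq mat hrect, enumerate_map, List.map_map, levels_add, levels_cat]
  rfl

-- ===== VERDICT (by name: the statement is the Claim_ definition above) =====
theorem build_2_tree_spec : Claim_equal_build_2_tree := by
  intro mat n _ hpre
  obtain ⟨hne, _, hmain⟩ := hpre
  have h0 : PySem.List.pyGetD mat 0 [] = mat.headD [] := by
    cases mat with
    | nil => simp at hne
    | cons r rs => simp [PySem.List.pyGetD_zero_cons]
  rcases hmain with ⟨hn, hge⟩ | ⟨hrect, _⟩
  · exact build_2_tree_eq_nle mat n hn (by rw [h0]; exact hge)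
  · exact build_2_tree_eq mat n (by rw [h0]; exact hrect)
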